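-- pv_equiv track=rewrite | github.com/k2works/pragmatic-programing-exercise-2023 | src/api/chap02_test.py | prime1
-- ===== SOURCE A (Python) =====
-- def prime1(x: int) -> int:
--     """x以下の素数を列挙（第１版）
--     >>> prime1(1000)
--     78022
--     """
--     counter = 0
--     for n in range(2, x+1):
--         for i in range(2, n):
--             counter += 1
--             if n % i == 0:
--                 break
--     return counter
-- ===== SOURCE B (Python) =====
-- def prime1(x: int) -> int:
--     counter = 0
--     for n in range(2, x + 1):
--         d = 2
--         while d * d <= n:
--             if n % d == 0:
--                 break
--             d += 1
--         if d * d <= n: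
--             counter += d - 1      # composite: inner scan stops at smallest divisor d
--         else:
--             counter += n - 2      # prime: inner scan runs through all of 2..n-1
--     return counter
-- ===== Notes on version B (the rewrite author's own statement) =====
-- stated objective: faster
-- what changed: Instead of replaying A's full inner scan, B finds each n's smallest divisor by trial division only up to sqrt(n) and adds the iteration count in closed form (d-1 for composites, n-2 for primes).
import Mathlib
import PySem

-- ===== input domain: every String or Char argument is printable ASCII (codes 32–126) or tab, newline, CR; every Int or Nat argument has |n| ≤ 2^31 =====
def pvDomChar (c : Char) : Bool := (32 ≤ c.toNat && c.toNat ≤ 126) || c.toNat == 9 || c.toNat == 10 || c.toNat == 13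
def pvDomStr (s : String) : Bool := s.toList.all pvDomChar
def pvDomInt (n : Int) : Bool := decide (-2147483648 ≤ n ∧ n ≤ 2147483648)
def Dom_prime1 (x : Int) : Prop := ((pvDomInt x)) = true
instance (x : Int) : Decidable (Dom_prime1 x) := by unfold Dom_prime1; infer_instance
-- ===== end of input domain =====

-- B finds each n's smallest divisor by trial division only up to sqrt(n) and adds A's
-- inner-loop iteration count in closed form (d-1 for composites, n-2 for primes): faster.

-- ===== PORT A =====
-- A's inner loop: for i in range(2, n): counter += 1; if n % i == 0: break
def prime1_inner (n : Int) : List Int → Int → Int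
  | [], c => c
  | i :: rest, c =>
    if PySem.Int.mod n i = 0 then c + 1 else prime1_inner n rest (c + 1)

def prime1 (x : Int) : Int :=
  (PySem.List.pyRange 2 (x + 1) 1).foldl
    (fun counter n => prime1_inner n (PySem.List.pyRange 2 n 1) counter) 0

-- ===== PORT B =====
-- B's 'd = 2; while d*d <= n: if n % d == 0: break; d += 1' followed by the test
-- 'd*d <= n' (= the loop broke): some d when it broke, none when the guard failed.
def prime1_findD (n d : Int) : Option Int :=
  if h : d * d ≤ n then
    (if PySem.Int.mod n d = 0 then some d else prime1_findD n (d + 1))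
  else none
termination_by (n + 1 - d).toNat
decreasing_by
  have h1 : (0:Int) ≤ n := le_trans (mul_self_nonneg d) h
  have h2 : 2 * d - 1 ≤ n := le_trans (by nlinarith) h
  omega

def prime1_alt (x : Int) : Int :=
  (PySem.List.pyRange 2 (x + 1) 1).foldl
    (fun counter n =>
      match prime1_findD n 2 with
      | some d => counter + (d - 1)
      | none => counter + (n - 2)) 0

-- ===== PRECONDITION & SPEC =====
def Spec_prime1 (x : Int) (out : Int) : Prop := out = prime1_alt x
instance (x : Int) (out : Int) : Decidable (Spec_prime1 x out) := by unfold Spec_prime1; infer_instance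

-- ===== CLAIM (what is proved, stated in full; the proofs are below) =====
def Claim_equal_prime1 : Prop := ∀ (x : Int), Dom_prime1 x → Spec_prime1 x (prime1 x)

-- ===== LEMMAS AND PROOFS =====

-- tandem scan lemma: from position i (no divisor of n lies below i), A's remaining inner
-- scan adds (d - i + 1) when B's search finds d, and (n - i) when it finds nothing.
theorem prime1_scan_eq (k : Nat) : ∀ (n i c : Int), 2 ≤ n → 2 ≤ i → i ≤ n →
    (n - i).toNat = k → (∀ j, 2 ≤ j → j < i → PySem.Int.mod n j ≠ 0) →
    prime1_inner n (PySem.List.pyRange i n 1) c =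
      (match prime1_findD n i with
       | some d => c + (d - i + 1)
       | none => c + (n - i)) := by
  induction k using Nat.strong_induction_on with
  | _ k ih =>
    intro n i c hn hi hin hk hinv
    rcases eq_or_lt_of_le hin with heq | hlt
    · -- i = n: the scan list is empty and B's guard n*n ≤ n fails
      subst heq
      rw [PySem.List.pyRange_one_eq_nil (le_refl i)]
      rw [prime1_findD]
      have hno : ¬ (i * i ≤ i) := by nlinarith
      simp [prime1_inner, hno]
    · rw [PySem.List.pyRange_one_cons hlt]
      simp only [prime1_inner]
      by_cases hdvd : PySem.Int.mod n i = 0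
      · -- A breaks at i; B's guard i*i ≤ n must hold because the cofactor would
        -- otherwise be a smaller divisor, excluded by the invariant
        have hii : i * i ≤ n := by
          obtain ⟨k', hk'⟩ := (PySem.Int.mod_eq_zero_iff_dvd n i).mp hdvd
          have hk1 : 1 ≤ k' := by nlinarith
          have hk2 : 2 ≤ k' := by
            rcases eq_or_lt_of_le hk1 with h1 | h1
            · exfalso; rw [← h1, mul_one] at hk'; omega
            · omega
          by_contra hno
          rw [not_le] at hno
          have hki : k' < i := lt_of_mul_lt_mul_left (by nlinarith) (by linarith)
          exact hinv k' hk2 hki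
            ((PySem.Int.mod_eq_zero_iff_dvd n k').mpr ⟨i, by linarith [hk']⟩)
        have hfd : prime1_findD n i = some i := by
          rw [prime1_findD]; simp [hii, hdvd]
        rw [if_pos hdvd, hfd]
        show c + 1 = c + (i - i + 1)
        omega
      · have hinv' : ∀ j, 2 ≤ j → j < i + 1 → PySem.Int.mod n j ≠ 0 := by
          intro j h2j hji
          rcases eq_or_lt_of_le (Int.lt_add_one_iff.mp hji) with h | h
          · rw [h]; exact hdvd
          · exact hinv j h2j h
        have hrec := ih (n - (i + 1)).toNat (by omega) n (i + 1) (c + 1) hn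
          (by omega) (by omega) rfl hinv'
        rw [if_neg hdvd, hrec]
        by_cases hii : i * i ≤ n
        · have hfd : prime1_findD n i = prime1_findD n (i + 1) := by
            rw [prime1_findD]; simp [hii, hdvd]
          rw [hfd]
          cases prime1_findD n (i + 1) with
          | none => show c + 1 + (n - (i + 1)) = c + (n - i); omega
          | some d => show c + 1 + (d - (i + 1) + 1) = c + (d - i + 1); omega
        · have h2 : ¬ ((i + 1) * (i + 1) ≤ n) := by nlinarith
          have hfd : prime1_findD n i = none := by
            rw [prime1_findD]; simp [hii]
          have hnone : prime1_findD n (i + 1) = none := by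
            rw [prime1_findD]; simp [h2]
          rw [hfd, hnone]
          show c + 1 + (n - (i + 1)) = c + (n - i)
          omega

theorem prime1_eq (x : Int) : prime1 x = prime1_alt x := by
  unfold prime1 prime1_alt
  apply PySem.List.foldl_congr_mem
  intro c n hmem
  have hn := (PySem.List.mem_pyRange_one).mp hmem
  have h := prime1_scan_eq (n - 2).toNat n 2 c hn.1 (le_refl 2) hn.1 rfl
    (by intro j h2 hj; omega)
  rw [h]
  cases hfd : prime1_findD n 2 with
  | none => show c + (n - 2) = c + (n - 2); rfl
  | some d => show c + (d - 2 + 1) = c + (d - 1); omega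

-- ===== VERDICT (by name: the statement is the Claim_ definition above) =====
theorem prime1_spec : Claim_equal_prime1 := by
  intro x _
  exact prime1_eq x
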